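-- pv_equiv track=rewrite | github.com/fancyland-llc/active-transport-prime-gas | scripts/verify_510510_zero_defect.py | factor_phi
-- ===== SOURCE A (Python) =====
-- from typing import List, Dict, Tuple
--
-- def factor_phi(m: int, primes_in_m: List[int]) -> List[Tuple[int, int]]:
--     """
--     Factor φ(m) for a primorial m = p1·p2·...·pk.
--     φ(m) = (p1-1)(p2-1)...(pk-1)
--     """
--     from collections import Counter
--
--     phi_factors = Counter()
--     for p in primes_in_m:
--         # Factor (p-1)
--         n = p - 1
--         for q in range(2, n + 1):
--             if q * q > n:
--                 break
--             while n % q == 0: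
--                 phi_factors[q] += 1
--                 n //= q
--         if n > 1:
--             phi_factors[n] += 1
--
--     return list(phi_factors.items())
-- ===== SOURCE B (Python) =====
-- def least_factor(n):
--     # smallest factor >= 2 of n (n >= 2): check 2, then odd candidates only
--     if n % 2 == 0:
--         return 2
--     k = 3
--     while k * k <= n:
--         if n % k == 0:
--             return k
--         k += 2
--     return n
--
-- def factor_phi(m, primes_in_m):
--     counts = {}
--     for p in primes_in_m:
--         n = p - 1
--         while n > 1:
--             q = least_factor(n)
--             counts[q] = counts.get(q, 0) + 1
--             n //= q
--     return list(counts.items())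
-- ===== Notes on version B (the rewrite author's own statement) =====
-- stated objective: alternative
-- what changed: A factors each p-1 with one upward trial-division scan that divides factors out in place while updating a Counter; B instead repeatedly extracts the smallest prime factor of the remaining cofactor with a 2-then-odd-candidates search, counting into a plain dict, which yields the same factors in the same first-appearance order.
import Mathlib
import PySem

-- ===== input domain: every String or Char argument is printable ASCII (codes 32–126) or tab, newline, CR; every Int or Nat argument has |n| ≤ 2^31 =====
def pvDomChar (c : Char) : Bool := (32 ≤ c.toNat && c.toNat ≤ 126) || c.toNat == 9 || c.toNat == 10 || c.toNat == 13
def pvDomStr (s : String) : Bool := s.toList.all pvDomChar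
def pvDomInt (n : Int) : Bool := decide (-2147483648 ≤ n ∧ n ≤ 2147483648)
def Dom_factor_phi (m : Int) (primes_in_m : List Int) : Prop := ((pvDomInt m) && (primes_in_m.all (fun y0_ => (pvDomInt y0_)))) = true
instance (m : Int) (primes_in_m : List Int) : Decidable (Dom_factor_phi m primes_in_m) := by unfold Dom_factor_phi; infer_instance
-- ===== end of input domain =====

-- B replaces A's single upward trial-division scan (with in-loop Counter updates) by repeated
-- extraction of the smallest prime factor (a 2-then-odd candidate scan), counting into a plain dict;
-- objective: alternative decomposition, same exact return value.

-- used by the termination proofs of both ports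
theorem pvEdivLt {n q : Int} (hn : 1 ≤ n) (hq : 2 ≤ q) : n / q < n := by
  have h1 : n = ((n.toNat : Nat) : Int) := by omega
  have h2 : q = ((q.toNat : Nat) : Int) := by omega
  rw [h1, h2, ← Int.natCast_div]
  have := Nat.div_lt_self (by omega : 0 < n.toNat) (by omega : 1 < q.toNat)
  omega

-- ===== PORT A =====
-- inner 'while n % q == 0: phi_factors[q] += 1; n //= q'.
-- The conjuncts '2 ≤ q ∧ 1 ≤ n' only make the recursion total; they hold whenever the Python loop runs.
def pvADiv (q n : Int) (d : PySem.Dict Int Int) : Int × PySem.Dict Int Int :=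
  if h : PySem.Int.mod n q = 0 ∧ 2 ≤ q ∧ 1 ≤ n then
    pvADiv q (PySem.Int.floordiv n q) (d.modify q 0 (· + 1))
  else (n, d)
termination_by n.toNat
decreasing_by
  obtain ⟨h1, h2, h3⟩ := h
  rw [PySem.Int.floordiv_eq_ediv_of_pos (by omega)]
  have h5 : n / q < n := pvEdivLt h3 h2
  have h6 : 0 ≤ n / q := Int.ediv_nonneg (by omega) (by omega)
  omega

-- 'for q in range(2, n+1): if q*q > n: break; <inner while>'  (n0 is the n at loop entry)
def pvALoop (n0 q n : Int) (d : PySem.Dict Int Int) : Int × PySem.Dict Int Int :=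
  if q < n0 + 1 then
    if q * q > n then (n, d)
    else pvALoop n0 (q + 1) (pvADiv q n d).1 (pvADiv q n d).2
  else (n, d)
termination_by (n0 + 1 - q).toNat
decreasing_by omega

-- one iteration of 'for p in primes_in_m'  (n = p - 1; then the inner for; then 'if n > 1')
def pvAStep (d : PySem.Dict Int Int) (p : Int) : PySem.Dict Int Int :=
  if (pvALoop (p - 1) 2 (p - 1) d).1 > 1 then
    (pvALoop (p - 1) 2 (p - 1) d).2.modify (pvALoop (p - 1) 2 (p - 1) d).1 0 (· + 1)
  else (pvALoop (p - 1) 2 (p - 1) d).2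

def factor_phi (m : Int) (primes_in_m : List Int) : List (Int × Int) :=
  (primes_in_m.foldl pvAStep PySem.Dict.empty).items

-- ===== PORT B =====
-- 'k = 3; while k*k <= n: if n % k == 0: return k; k += 2; return n'
def pvLeastAux (n k : Int) : Int :=
  if h : k * k ≤ n then
    (if PySem.Int.mod n k = 0 then k else pvLeastAux n (k + 2))
  else n
termination_by (n + 3 - k).toNat
decreasing_by
  have hk : k ≤ n + 1 := by nlinarith
  omega

-- 'least_factor(n)'
def pvLeast (n : Int) : Int :=
  if PySem.Int.mod n 2 = 0 then 2 else pvLeastAux n 3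

-- needed for termination of pvBLoop
theorem pvLeastAux_ge {n k : Int} (hn : 2 ≤ n) (hk : 2 ≤ k) : 2 ≤ pvLeastAux n k := by
  fun_induction pvLeastAux n k with
  | case1 k h hm => omega
  | case2 k h hm ih => exact ih (by omega)
  | case3 k h => omega

theorem pvLeast_ge {n : Int} (hn : 1 < n) : 2 ≤ pvLeast n := by
  unfold pvLeast
  split
  · omega
  · exact pvLeastAux_ge (by omega) (by omega)

-- 'while n > 1: q = least_factor(n); counts[q] = counts.get(q, 0) + 1; n //= q'
def pvBLoop (n : Int) (d : PySem.Dict Int Int) : PySem.Dict Int Int :=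
  if h : 1 < n then
    pvBLoop (PySem.Int.floordiv n (pvLeast n)) (d.insert (pvLeast n) (d.getD (pvLeast n) 0 + 1))
  else d
termination_by n.toNat
decreasing_by
  have hq : 2 ≤ pvLeast n := pvLeast_ge h
  rw [PySem.Int.floordiv_eq_ediv_of_pos (by omega)]
  have h5 : n / pvLeast n < n := pvEdivLt (by omega) hq
  have h6 : 0 ≤ n / pvLeast n := Int.ediv_nonneg (by omega) (by omega)
  omega

def factor_phi_alt (m : Int) (primes_in_m : List Int) : List (Int × Int) :=
  (primes_in_m.foldl (fun d p => pvBLoop (p - 1) d) PySem.Dict.empty).items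

-- ===== PRECONDITION & SPEC =====
def Spec_factor_phi (m : Int) (primes_in_m : List Int) (out : List (Int × Int)) : Prop := out = factor_phi_alt m primes_in_m
instance (m : Int) (primes_in_m : List Int) (out : List (Int × Int)) : Decidable (Spec_factor_phi m primes_in_m out) := by unfold Spec_factor_phi; infer_instance

-- ===== CLAIM (what is proved, stated in full; the proofs are below) =====
def Claim_equal_factor_phi : Prop := ∀ (m : Int) (primes_in_m : List Int), Dom_factor_phi m primes_in_m → Spec_factor_phi m primes_in_m (factor_phi m primes_in_m)

-- ===== LEMMAS AND PROOFS =====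

-- the common counting step both ports reduce to
def pvCnt (d : PySem.Dict Int Int) (q : Int) : PySem.Dict Int Int := d.modify q 0 (· + 1)

-- Nat-level model of A's inner while loop: the emitted factors and the residual
def pvStripL (q n : Nat) : List Nat × Nat :=
  if h : 2 ≤ q ∧ 1 ≤ n ∧ q ∣ n then
    (q :: (pvStripL q (n / q)).1, (pvStripL q (n / q)).2)
  else ([], n)
termination_by n
decreasing_by exact Nat.div_lt_self (by omega) (by omega)

theorem pvStripL_snd_le (q n : Nat) : (pvStripL q n).2 ≤ n := by
  fun_induction pvStripL q n with
  | case1 n h ih => exact le_trans ih (Nat.div_le_self n q)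
  | case2 n h => simp

theorem pvStripL_snd_pos (q n : Nat) (hn : 1 ≤ n) : 1 ≤ (pvStripL q n).2 := by
  fun_induction pvStripL q n with
  | case1 n h ih =>
    exact ih (Nat.one_le_div_iff (by omega) |>.mpr (Nat.le_of_dvd (by omega) h.2.2))
  | case2 n h => simpa using hn

-- Nat-level model of A's outer for loop starting at candidate q
def pvFA (q n : Nat) : List Nat × Nat :=
  if n < q * q then ([], n)
  else ((pvStripL q n).1 ++ (pvFA (q + 1) (pvStripL q n).2).1,
        (pvFA (q + 1) (pvStripL q n).2).2)
termination_by n + (n + 1 - q)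
decreasing_by
  have hs : (pvStripL q n).2 ≤ n := pvStripL_snd_le q n
  have hq : q ≤ n := by
    rcases Nat.eq_zero_or_pos q with h0 | h0
    · omega
    · have : q ≤ q * q := Nat.le_mul_of_pos_left q h0
      omega
  omega

theorem primeFactorsList_cons {n : Nat} (h : 2 ≤ n) :
    n.primeFactorsList = n.minFac :: (n / n.minFac).primeFactorsList := by
  obtain ⟨k, rfl⟩ : ∃ k, n = k + 2 := ⟨n - 2, by omega⟩
  rw [Nat.primeFactorsList]

theorem pvStripL_spec (q n : Nat) : 2 ≤ q → 1 ≤ n → (∀ r, 2 ≤ r → r < q → ¬ r ∣ n) →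
    (pvStripL q n).1 ++ (pvStripL q n).2.primeFactorsList = n.primeFactorsList ∧
    ¬ q ∣ (pvStripL q n).2 ∧ 1 ≤ (pvStripL q n).2 ∧ (pvStripL q n).2 ∣ n := by
  fun_induction pvStripL q n with
  | case1 n h ih =>
    intro hq hn hsmall
    obtain ⟨-, -, hdvd⟩ := h
    have hqn : q ≤ n := Nat.le_of_dvd (by omega) hdvd
    have hn2 : 2 ≤ n := by omega
    have hq1 : 1 ≤ n / q := Nat.one_le_div_iff (by omega) |>.mpr hqn
    have hsmall' : ∀ r, 2 ≤ r → r < q → ¬ r ∣ n / q := fun r h2 h3 hd =>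
      hsmall r h2 h3 (hd.trans (Nat.div_dvd_of_dvd hdvd))
    obtain ⟨ih1, ih2, ih3, ih4⟩ := ih hq hq1 hsmall'
    have hmf : n.minFac = q := by
      have hle := Nat.minFac_le_of_dvd hq hdvd
      have hdv : n.minFac ∣ n := Nat.minFac_dvd n
      have h2' : 2 ≤ n.minFac := (Nat.minFac_prime (by omega : n ≠ 1)).two_le
      by_contra hne
      exact hsmall _ h2' (lt_of_le_of_ne hle hne) hdv
    refine ⟨?_, ih2, ih3, ih4.trans (Nat.div_dvd_of_dvd hdvd)⟩
    rw [primeFactorsList_cons hn2, hmf]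
    simpa using ih1
  | case2 n h =>
    intro hq hn _
    exact ⟨by simp, fun hd => h ⟨hq, hn, hd⟩, hn, by simp⟩

-- A's scan produces exactly the prime factorization (split into list + residual)
theorem pvFA_spec (q n : Nat) : 2 ≤ q → 1 ≤ n → (∀ r, 2 ≤ r → r < q → ¬ r ∣ n) →
    (pvFA q n).1 ++ (if 1 < (pvFA q n).2 then [(pvFA q n).2] else []) = n.primeFactorsList := by
  fun_induction pvFA q n with
  | case1 q n h =>
    intro hq hn hsmall
    by_cases h1 : 1 < n
    · have hp : n.Prime := by
        by_contra hnp
        have hsq := Nat.minFac_sq_le_self (by omega : 0 < n) hnp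
        have hdv : n.minFac ∣ n := Nat.minFac_dvd n
        have h2' : 2 ≤ n.minFac := (Nat.minFac_prime (by omega : n ≠ 1)).two_le
        have hqf : q ≤ n.minFac := by
          by_contra hlt
          exact hsmall _ h2' (by omega) hdv
        have : q * q ≤ n.minFac * n.minFac := Nat.mul_le_mul hqf hqf
        have : n.minFac * n.minFac ≤ n := by
          have := hsq
          rwa [pow_two] at this
        omega
      simp [h1, Nat.primeFactorsList_prime hp]
    · have : n = 1 := by omega
      simp [this, Nat.primeFactorsList_one]
  | case2 q n h ih =>
    intro hq hn hsmall
    obtain ⟨hS1, hS2, hS3, hS4⟩ := pvStripL_spec q n hq hn hsmall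
    have hsmall' : ∀ r, 2 ≤ r → r < q + 1 → ¬ r ∣ (pvStripL q n).2 := by
      intro r h2 h3 hd
      rcases Nat.lt_or_ge r q with hr | hr
      · exact hsmall r h2 hr (hd.trans hS4)
      · have : r = q := by omega
        exact hS2 (this ▸ hd)
    have ih' := ih (by omega) hS3 hsmall'
    rw [List.append_assoc, ih', hS1]

-- bridge: the Int/dict inner while = pvStripL folded over pvCnt
theorem pvADiv_eq (q n : Int) (d : PySem.Dict Int Int) : 2 ≤ q → 1 ≤ n →
    pvADiv q n d =
      (((pvStripL q.toNat n.toNat).2 : Int),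
       ((pvStripL q.toNat n.toNat).1.map (fun x => (x : Int))).foldl pvCnt d) := by
  fun_induction pvADiv q n d with
  | case1 n d h ih =>
    intro hq hn
    obtain ⟨h1, -, -⟩ := h
    have hq' : ((q.toNat : Nat) : Int) = q := Int.toNat_of_nonneg (by omega)
    have hn' : ((n.toNat : Nat) : Int) = n := Int.toNat_of_nonneg (by omega)
    have hdvd : q ∣ n := (PySem.Int.mod_eq_zero_iff_dvd n q).mp h1
    have hdvdN : q.toNat ∣ n.toNat := by
      apply Int.natCast_dvd_natCast.mp
      rw [hq', hn']; exact hdvd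
    have hfd : PySem.Int.floordiv n q = ((n.toNat / q.toNat : Nat) : Int) := by
      conv_lhs => rw [← hq', ← hn']
      exact PySem.Int.floordiv_natCast _ _
    have hdivpos : 1 ≤ n.toNat / q.toNat :=
      Nat.one_le_div_iff (by omega) |>.mpr (Nat.le_of_dvd (by omega) hdvdN)
    have ih' := ih hq (by rw [hfd]; omega)
    rw [pvStripL]
    rw [dif_pos ⟨by omega, by omega, hdvdN⟩]
    have htn : (PySem.Int.floordiv n q).toNat = n.toNat / q.toNat := by
      rw [hfd]; exact Int.toNat_natCast _
    rw [ih', htn]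
    simp [pvCnt, hq']
  | case2 n d h =>
    intro hq hn
    have hq' : ((q.toNat : Nat) : Int) = q := Int.toNat_of_nonneg (by omega)
    have hn' : ((n.toNat : Nat) : Int) = n := Int.toNat_of_nonneg (by omega)
    have hndvd : ¬ q.toNat ∣ n.toNat := by
      intro hd
      apply h
      refine ⟨?_, hq, hn⟩
      rw [PySem.Int.mod_eq_zero_iff_dvd]
      rw [← hq', ← hn']
      exact_mod_cast hd
    rw [pvStripL, dif_neg (by tauto)]
    simp [hn']

-- bridge: the Int/dict outer loop = pvFA folded over pvCnt
theorem pvALoop_eq (n0 q n : Int) (d : PySem.Dict Int Int) :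
    2 ≤ q → 1 ≤ n → n ≤ n0 →
    pvALoop n0 q n d =
      (((pvFA q.toNat n.toNat).2 : Int),
       ((pvFA q.toNat n.toNat).1.map (fun x => (x : Int))).foldl pvCnt d) := by
  fun_induction pvALoop n0 q n d with
  | case1 q n d hlt hbrk =>
    intro hq hn hle
    have hsq : n.toNat < q.toNat * q.toNat := by
      zify
      rw [Int.toNat_of_nonneg (by omega : (0:Int) ≤ n), Int.toNat_of_nonneg (by omega : (0:Int) ≤ q)]
      omega
    rw [pvFA, if_pos hsq]
    simp [Int.toNat_of_nonneg (by omega : (0:Int) ≤ n)]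
  | case2 q n d hlt hbrk ih =>
    intro hq hn hle
    have hq' : ((q.toNat : Nat) : Int) = q := Int.toNat_of_nonneg (by omega)
    have hn' : ((n.toNat : Nat) : Int) = n := Int.toNat_of_nonneg (by omega)
    have hsq : ¬ n.toNat < q.toNat * q.toNat := by
      zify
      rw [hn', hq']
      omega
    rw [pvADiv_eq q n d hq hn] at ih ⊢
    have hspos : 1 ≤ (pvStripL q.toNat n.toNat).2 := pvStripL_snd_pos _ _ (by omega)
    have hsle : (pvStripL q.toNat n.toNat).2 ≤ n.toNat := pvStripL_snd_le _ _
    have ih' := ih (by omega) (by simp; omega) (by simp; omega)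
    simp only at ih'
    rw [ih']
    have hq1 : (q + 1).toNat = q.toNat + 1 := by omega
    rw [hq1, Int.toNat_natCast]
    conv_rhs => rw [pvFA]
    rw [if_neg hsq]
    simp [List.map_append, List.foldl_append]
  | case3 q n d hlt =>
    intro hq hn hle
    have hqq : q ≤ q * q := le_mul_of_one_le_left (by omega) (by omega)
    have hsq : n.toNat < q.toNat * q.toNat := by
      zify
      rw [Int.toNat_of_nonneg (by omega : (0:Int) ≤ n), Int.toNat_of_nonneg (by omega : (0:Int) ≤ q)]
      omega
    rw [pvFA, if_pos hsq]
    simp [Int.toNat_of_nonneg (by omega : (0:Int) ≤ n)]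

-- A's per-prime step counts exactly the prime factors of (p-1)
theorem pvAStep_eq (d : PySem.Dict Int Int) (p : Int) :
    pvAStep d p = (((p - 1).toNat.primeFactorsList).map (fun x => (x : Int))).foldl pvCnt d := by
  unfold pvAStep
  by_cases h2 : 2 ≤ p - 1
  · rw [pvALoop_eq (p - 1) 2 (p - 1) d (by omega) (by omega) (by omega)]
    have hfa := pvFA_spec 2 (p - 1).toNat (by omega) (by omega) (by intro r h2 h3 _; omega)
    simp only [show ((2:Int)).toNat = 2 from rfl] at *
    rw [← hfa]
    by_cases h1 : 1 < (pvFA 2 (p - 1).toNat).2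
    · rw [if_pos (by exact_mod_cast h1), if_pos h1]
      simp [List.map_append, List.foldl_append, pvCnt]
    · rw [if_neg (by exact_mod_cast h1), if_neg h1]
      simp
  · have hexit : pvALoop (p - 1) 2 (p - 1) d = (p - 1, d) := by
      rw [pvALoop, if_neg (by omega)]
    rw [hexit]
    have h' : (p - 1).toNat = 0 ∨ (p - 1).toNat = 1 := by omega
    rcases h' with h | h <;>
      simp [h, Nat.primeFactorsList_zero, Nat.primeFactorsList_one,
        if_neg (show ¬ (p - 1 : Int) > 1 by omega)]

-- B side: the candidate scan is Mathlib's minFacAux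
theorem pvLeastAux_eq (m k : Nat) : pvLeastAux (m : Int) (k : Int) = (Nat.minFacAux m k : Int) := by
  have hdiv : ∀ j : Nat, (PySem.Int.mod (m : Int) (j : Int) = 0) ↔ j ∣ m := by
    intro j
    rw [PySem.Int.mod_eq_zero_iff_dvd]
    exact Int.natCast_dvd_natCast
  fun_induction Nat.minFacAux m k with
  | case1 x k h =>
    rw [pvLeastAux, dif_neg (by exact_mod_cast Nat.not_le.mpr h)]
  | case2 x k h hd =>
    rw [pvLeastAux, dif_pos (by exact_mod_cast Nat.le_of_not_lt h), if_pos ((hdiv k).mpr hd)]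
  | case3 x k h hd ih =>
    rw [pvLeastAux, dif_pos (by exact_mod_cast Nat.le_of_not_lt h),
      if_neg (fun hc => hd ((hdiv k).mp hc))]
    rw [show ((x : Int) + 2) = (((x + 2 : Nat)) : Int) by push_cast; ring]
    rw [ih, Nat.minFacAux]

theorem pvLeast_eq {n : Int} (hn : 1 < n) : pvLeast n = (n.toNat.minFac : Int) := by
  have hn' : ((n.toNat : Nat) : Int) = n := Int.toNat_of_nonneg (by omega)
  have hiff : PySem.Int.mod n 2 = 0 ↔ 2 ∣ n.toNat := by
    rw [PySem.Int.mod_eq_zero_iff_dvd, ← hn']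
    norm_cast
  unfold pvLeast
  rw [Nat.minFac]
  by_cases he : 2 ∣ n.toNat
  · rw [if_pos (hiff.mpr he), if_pos he]
    norm_num
  · rw [if_neg (fun hc => he (hiff.mp hc)), if_neg he, ← hn']
    have := pvLeastAux_eq n.toNat 3
    exact_mod_cast this

-- Python's 'counts[q] = counts.get(q, 0) + 1' is the Counter update
theorem pvInsertCnt (d : PySem.Dict Int Int) (k : Int) :
    d.insert k (d.getD k 0 + 1) = pvCnt d k := rfl

-- B's loop counts exactly the prime factors of n
theorem pvBLoop_eq (n : Int) (d : PySem.Dict Int Int) :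
    pvBLoop n d = ((n.toNat.primeFactorsList).map (fun x => (x : Int))).foldl pvCnt d := by
  fun_induction pvBLoop n d with
  | case1 n d h ih =>
    have hn' : ((n.toNat : Nat) : Int) = n := Int.toNat_of_nonneg (by omega)
    have hmf : 2 ≤ n.toNat.minFac := (Nat.minFac_prime (by omega : n.toNat ≠ 1)).two_le
    have hfd : PySem.Int.floordiv n (pvLeast n) = ((n.toNat / n.toNat.minFac : Nat) : Int) := by
      rw [pvLeast_eq h]
      rw [show PySem.Int.floordiv n (↑n.toNat.minFac)
            = PySem.Int.floordiv (↑n.toNat) (↑n.toNat.minFac) by rw [hn']]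
      exact PySem.Int.floordiv_natCast _ _
    rw [hfd, pvLeast_eq h, pvInsertCnt] at ih ⊢
    rw [Int.toNat_natCast] at ih
    rw [ih, primeFactorsList_cons (by omega : 2 ≤ n.toNat)]
    simp
  | case2 n d h =>
    have : n.toNat = 0 ∨ n.toNat = 1 := by omega
    rcases this with h1 | h1 <;>
      simp [h1, Nat.primeFactorsList_zero, Nat.primeFactorsList_one]

-- ===== VERDICT (by name: the statement is the Claim_ definition above) =====
theorem factor_phi_spec : Claim_equal_factor_phi := by
  intro m ps _
  unfold Spec_factor_phi factor_phi factor_phi_alt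
  congr 1
  apply PySem.List.foldl_congr_mem
  intro d p _
  rw [pvAStep_eq, pvBLoop_eq]
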